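-- pv_equiv track=rewrite | github.com/LisaVial/Spielwiese | elephant_for_seminar.py | make_label_spiketimes_map
-- ===== SOURCE A (Python) =====
-- def make_label_spiketimes_map(ordered_labels, spiketimes, dead_channels):
--     label_spiketimes_map = dict()
--
--     live_channel_index = 0
--     for index, label in enumerate(ordered_labels):
--         if index in dead_channels:
--             continue
--
--         label_spiketimes_map[label] = spiketimes[live_channel_index]
--         live_channel_index += 1
--
--     return label_spiketimes_map
-- ===== SOURCE B (Python) =====
-- def make_label_spiketimes_map(ordered_labels, spiketimes, dead_channels):
--     # Sort the distinct non-negative dead indices once; then each label's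
--     # spiketimes position is computed independently by binary search:
--     # position(i) = i - (number of dead indices strictly below i).
--     dead = sorted({d for d in dead_channels if d >= 0})
--     result = {}
--     for i, label in enumerate(ordered_labels):
--         lo, hi = 0, len(dead)
--         while lo < hi:
--             mid = (lo + hi) // 2
--             if dead[mid] < i:
--                 lo = mid + 1
--             else:
--                 hi = mid
--         if lo < len(dead) and dead[lo] == i:
--             continue
--         result[label] = spiketimes[i - lo]
--     return result
-- ===== Notes on version B (the rewrite author's own statement) =====
-- stated objective: alternative
-- what changed: Replaces A's sequential live-channel counter by a different algorithm: sort the distinct non-negative dead indices once, then compute each label's spiketimes position independently as i minus the binary-search rank of i in that sorted list (rank arithmetic instead of interleaved counting; membership test also falls out of the binary search).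
import Mathlib
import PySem

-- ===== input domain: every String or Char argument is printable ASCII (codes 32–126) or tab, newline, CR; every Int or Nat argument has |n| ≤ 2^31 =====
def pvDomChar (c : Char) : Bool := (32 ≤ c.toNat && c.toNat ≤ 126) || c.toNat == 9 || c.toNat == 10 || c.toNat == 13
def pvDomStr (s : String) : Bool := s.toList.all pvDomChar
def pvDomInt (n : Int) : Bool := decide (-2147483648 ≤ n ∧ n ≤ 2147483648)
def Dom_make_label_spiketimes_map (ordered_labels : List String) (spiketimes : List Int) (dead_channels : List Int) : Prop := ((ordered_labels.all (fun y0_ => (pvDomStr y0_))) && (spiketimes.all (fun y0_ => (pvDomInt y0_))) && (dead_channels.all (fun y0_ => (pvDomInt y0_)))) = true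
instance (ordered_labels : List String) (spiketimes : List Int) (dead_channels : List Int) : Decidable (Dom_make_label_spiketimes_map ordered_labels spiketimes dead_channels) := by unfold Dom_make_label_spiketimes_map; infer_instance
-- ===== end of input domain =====

-- B replaces A's sequential live-channel counter by a different algorithm: sort the distinct
-- non-negative dead indices once, then compute each label's spiketimes position independently
-- as i minus the binary-search rank of i in that sorted list (alternative decomposition).

-- ===== PORT A =====
-- A's loop: state is (dict so far, live_channel_index); spiketimes[live_channel_index]
-- is PySem.List.pyGet?; inside Pre_ it is always `some` (the `.getD 0` never fires there).
def make_label_spiketimes_map (ordered_labels : List String) (spiketimes : List Int) (dead_channels : List Int) : List (String × Int) :=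
  ((PySem.List.enumerate ordered_labels 0).foldl
    (fun (st : PySem.Dict String Int × Int) p =>
      if dead_channels.contains p.1 then st
      else (st.1.insert p.2 ((PySem.List.pyGet? spiketimes st.2).getD 0), st.2 + 1))
    (PySem.Dict.empty, 0)).1.items

-- ===== PORT B =====
-- Source B's inner `while lo < hi` binary search, transcribed as a recursive helper
-- (dead[mid] is always in range, so List.getD is exact here).
def bsearch (dead : List Int) (i : Int) (lo hi : Nat) : Nat :=
  if _h : lo < hi then
    let mid := (lo + hi) / 2
    if dead.getD mid 0 < i then bsearch dead i (mid + 1) hi else bsearch dead i lo mid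
  else lo
termination_by hi - lo
decreasing_by all_goals omega

-- dead = sorted({d for d in dead_channels if d >= 0}); per-index binary-search rank.
def make_label_spiketimes_map_alt (ordered_labels : List String) (spiketimes : List Int) (dead_channels : List Int) : List (String × Int) :=
  let dead : List Int := PySem.List.sorted (PySem.Set.ofList (dead_channels.filter (fun d => 0 ≤ d))) (fun x => x) false
  ((PySem.List.enumerate ordered_labels 0).foldl
    (fun (res : PySem.Dict String Int) p =>
      let lo := bsearch dead p.1 0 dead.length
      if lo < dead.length ∧ dead.getD lo 0 = p.1 then res
      else res.insert p.2 ((PySem.List.pyGet? spiketimes (p.1 - (lo : Int))).getD 0))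
    PySem.Dict.empty).items

-- ===== PRECONDITION & SPEC =====
-- Pre_ excludes exactly the inputs where Python A raises IndexError: more live
-- channels than entries of spiketimes.
def Pre_make_label_spiketimes_map (ordered_labels : List String) (spiketimes : List Int) (dead_channels : List Int) : Prop :=
  ((PySem.List.enumerate ordered_labels 0).filter
      (fun p => !(dead_channels.contains p.1))).length ≤ spiketimes.length
instance (ordered_labels : List String) (spiketimes : List Int) (dead_channels : List Int) : Decidable (Pre_make_label_spiketimes_map ordered_labels spiketimes dead_channels) := by unfold Pre_make_label_spiketimes_map; infer_instance

def pvWitness_make_label_spiketimes_map : List String × List Int × List Int :=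
  (["a", "b", "c"], [10, 20], [1])

def Spec_make_label_spiketimes_map (ordered_labels : List String) (spiketimes : List Int) (dead_channels : List Int) (out : List (String × Int)) : Prop := out = make_label_spiketimes_map_alt ordered_labels spiketimes dead_channels
instance (ordered_labels : List String) (spiketimes : List Int) (dead_channels : List Int) (out : List (String × Int)) : Decidable (Spec_make_label_spiketimes_map ordered_labels spiketimes dead_channels out) := by unfold Spec_make_label_spiketimes_map; infer_instance

-- ===== CLAIM (what is proved, stated in full; the proofs are below) =====
def Claim_equal_make_label_spiketimes_map : Prop := ∀ (ordered_labels : List String) (spiketimes : List Int) (dead_channels : List Int), Dom_make_label_spiketimes_map ordered_labels spiketimes dead_channels → Pre_make_label_spiketimes_map ordered_labels spiketimes dead_channels → Spec_make_label_spiketimes_map ordered_labels spiketimes dead_channels (make_label_spiketimes_map ordered_labels spiketimes dead_channels)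

-- ===== LEMMAS AND PROOFS =====

-- Specification of the hand-written binary search on a (weakly) sorted list:
-- starting from boundary-correct lo, hi it returns a boundary-correct split point.
theorem bsearch_spec (l : List Int) (i : Int) (hs : l.Pairwise (· ≤ ·)) (lo hi : Nat)
    (hlh : lo ≤ hi) (hhl : hi ≤ l.length)
    (hpre : ∀ k, k < lo → k < l.length → l.getD k 0 < i)
    (hpost : ∀ k, hi ≤ k → k < l.length → ¬ l.getD k 0 < i) :
    bsearch l i lo hi ≤ l.length ∧
    (∀ k, k < bsearch l i lo hi → k < l.length → l.getD k 0 < i) ∧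
    (∀ k, bsearch l i lo hi ≤ k → k < l.length → ¬ l.getD k 0 < i) := by
  unfold bsearch
  by_cases h : lo < hi
  · simp only [h, dif_pos]
    have hmid1 : lo ≤ (lo + hi) / 2 := by omega
    have hmid2 : (lo + hi) / 2 < hi := by omega
    have hmidlen : (lo + hi) / 2 < l.length := by omega
    by_cases hc : l.getD ((lo + hi) / 2) 0 < i
    · simp only [hc, if_pos]
      exact bsearch_spec l i hs ((lo + hi) / 2 + 1) hi (by omega) hhl
        (fun k hk hkl => by
          have h1 : l.getD k 0 ≤ l.getD ((lo + hi) / 2) 0 := by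
            rcases Nat.lt_or_ge k ((lo + hi) / 2) with hlt | hge
            · rw [List.getD_eq_getElem l 0 hkl, List.getD_eq_getElem l 0 hmidlen]
              exact List.pairwise_iff_getElem.mp hs k ((lo + hi) / 2) hkl hmidlen hlt
            · have : k = (lo + hi) / 2 := by omega
              rw [this]
          exact lt_of_le_of_lt h1 hc)
        hpost
    · simp only [hc, if_neg, not_false_iff]
      exact bsearch_spec l i hs lo ((lo + hi) / 2) (by omega) (by omega) hpre
        (fun k hk hkl => by
          intro habs
          apply hc
          have h2 : l.getD ((lo + hi) / 2) 0 ≤ l.getD k 0 := by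
            rcases Nat.lt_or_ge ((lo + hi) / 2) k with hlt | hge
            · rw [List.getD_eq_getElem l 0 hkl, List.getD_eq_getElem l 0 hmidlen]
              exact List.pairwise_iff_getElem.mp hs ((lo + hi) / 2) k hmidlen hkl hlt
            · have : k = (lo + hi) / 2 := by omega
              rw [this]
          exact lt_of_le_of_lt h2 habs)
  · simp only [h, dif_neg, not_false_iff]
    have : lo = hi := by omega
    subst this
    exact ⟨by omega, fun k hk hkl => hpre k hk hkl, hpost⟩
termination_by hi - lo
decreasing_by all_goals omega

-- A boundary-correct split point r is the number of elements < i.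
theorem count_of_bounds (l : List Int) (i : Int) (r : Nat) (hr : r ≤ l.length)
    (h1 : ∀ k, k < r → k < l.length → l.getD k 0 < i)
    (h2 : ∀ k, r ≤ k → k < l.length → ¬ l.getD k 0 < i) :
    (l.filter (fun x => decide (x < i))).length = r := by
  have hsplit : l = l.take r ++ l.drop r := (List.take_append_drop r l).symm
  rw [hsplit, List.filter_append]
  have htake : (l.take r).filter (fun x => decide (x < i)) = l.take r := by
    apply List.filter_eq_self.mpr
    intro x hx
    obtain ⟨k, hk, he⟩ := List.mem_take_iff_getElem.mp hx
    have hkl : k < l.length := by omega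
    have := h1 k (by omega) hkl
    rw [List.getD_eq_getElem l 0 hkl] at this
    simpa [he] using this
  have hdrop : (l.drop r).filter (fun x => decide (x < i)) = [] := by
    apply List.filter_eq_nil_iff.mpr
    intro x hx
    rw [List.mem_iff_getElem] at hx
    obtain ⟨k, hk, he⟩ := hx
    rw [List.getElem_drop] at he
    have hkl : r + k < l.length := by
      have := hk; simp [List.length_drop] at this; omega
    have := h2 (r + k) (by omega) hkl
    rw [List.getD_eq_getElem l 0 hkl] at this
    simpa [he] using this
  rw [htake, hdrop]
  simp [List.length_take]
  omega

-- On a strictly sorted list, "i is a member" is exactly "the split point probes to i".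
theorem mem_iff_probe (l : List Int) (i : Int) (hs : l.Pairwise (· < ·)) (r : Nat)
    (hr : r ≤ l.length)
    (h1 : ∀ k, k < r → k < l.length → l.getD k 0 < i)
    (h2 : ∀ k, r ≤ k → k < l.length → ¬ l.getD k 0 < i) :
    (i ∈ l ↔ (r < l.length ∧ l.getD r 0 = i)) := by
  constructor
  · intro hmem
    rw [List.mem_iff_getElem] at hmem
    obtain ⟨k, hk, he⟩ := hmem
    have hkr : k = r := by
      rcases Nat.lt_trichotomy k r with hlt | heq | hgt
      · exfalso
        have := h1 k hlt hk
        rw [List.getD_eq_getElem l 0 hk, he] at this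
        exact lt_irrefl i this
      · exact heq
      · exfalso
        have hrl : r < l.length := by omega
        have hlt : l[r] < l[k] := List.pairwise_iff_getElem.mp hs r k hrl hk hgt
        have := h2 r (le_refl r) hrl
        rw [List.getD_eq_getElem l 0 hrl] at this
        rw [he] at hlt
        exact this (by omega)
    subst hkr
    exact ⟨hk, by rw [List.getD_eq_getElem l 0 hk]; exact he⟩
  · intro ⟨hlen, heq⟩
    rw [List.getD_eq_getElem l 0 hlen] at heq
    exact List.mem_iff_getElem.mpr ⟨r, hlen, heq⟩

-- number of dead (distinct, sorted) indices strictly below i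
def cnt (dead : List Int) (i : Int) : Nat := (dead.filter (fun x => decide (x < i))).length

-- cnt step: going from threshold i to i+1 adds 1 exactly when i is a dead index.
theorem cnt_step (dead : List Int) (i : Int) (hnd : dead.Nodup) :
    cnt dead (i + 1) = cnt dead i + (if i ∈ dead then 1 else 0) := by
  unfold cnt
  induction dead with
  | nil => simp
  | cons x xs ih =>
    have hnd' : xs.Nodup := hnd.of_cons
    have hx : x ∉ xs := (List.nodup_cons.mp hnd).1
    have ihx := ih hnd'
    by_cases hxi : x = i
    · subst hxi
      rw [List.filter_cons_of_pos (by simp),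
          List.filter_cons_of_neg (by simp),
          if_pos (show x ∈ x :: xs by simp), List.length_cons, ihx, if_neg hx]
    · have hix : i ≠ x := fun hh => hxi hh.symm
      have hmm : (i ∈ x :: xs) ↔ (i ∈ xs) := by simp [hix]
      by_cases h : x < i
      · rw [List.filter_cons_of_pos (by simp; omega),
            List.filter_cons_of_pos (by simpa using h),
            if_congr hmm rfl rfl, List.length_cons, List.length_cons, ihx]
        omega
      · rw [List.filter_cons_of_neg (by simp; omega),
            List.filter_cons_of_neg (by simpa using h),
            if_congr hmm rfl rfl, ihx]

-- cnt at 0 is 0 when all elements are ≥ 0.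
theorem cnt_zero (dead : List Int) (hpos : ∀ x ∈ dead, 0 ≤ x) : cnt dead 0 = 0 := by
  unfold cnt
  rw [List.filter_eq_nil_iff.mpr (fun x hx => by simpa using not_lt.mpr (hpos x hx))]
  rfl

-- The core loop correspondence: A's fold (manual counter, started at i - cnt i)
-- computes the same dict as B's fold (per-index binary-search rank), over any
-- enumerated tail starting at index i.
theorem loop_eq (spiketimes dead_channels : List Int) (dead : List Int)
    (hmem : ∀ x : Int, x ∈ dead ↔ (x ∈ dead_channels ∧ 0 ≤ x))
    (hsort : dead.Pairwise (· < ·)) :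
    ∀ (ls : List String) (i : Nat) (d : PySem.Dict String Int),
      ((PySem.List.enumerate ls (i : Int)).foldl
        (fun (st : PySem.Dict String Int × Int) p =>
          if dead_channels.contains p.1 then st
          else (st.1.insert p.2 ((PySem.List.pyGet? spiketimes st.2).getD 0), st.2 + 1))
        (d, (i : Int) - (cnt dead (i : Int) : Int))).1
      =
      (PySem.List.enumerate ls (i : Int)).foldl
        (fun (res : PySem.Dict String Int) p =>
          let lo := bsearch dead p.1 0 dead.length
          if lo < dead.length ∧ dead.getD lo 0 = p.1 then res
          else res.insert p.2 ((PySem.List.pyGet? spiketimes (p.1 - (lo : Int))).getD 0))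
        d := by
  have hle : dead.Pairwise (· ≤ ·) := hsort.imp le_of_lt
  have hnd : dead.Nodup := hsort.imp (fun h => ne_of_lt h)
  intro ls
  induction ls with
  | nil => intro i d; simp [PySem.List.enumerate_nil]
  | cons lb ls ih =>
    intro i d
    rw [PySem.List.enumerate_cons, List.foldl_cons, List.foldl_cons]
    have hspec := bsearch_spec dead (i : Int) hle 0 dead.length (by omega) (le_refl _)
      (by omega) (fun k hk _ => by omega)
    obtain ⟨hrlen, hb1, hb2⟩ := hspec
    set r := bsearch dead (i : Int) 0 dead.length with hrdef
    have hrcnt : r = cnt dead (i : Int) := by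
      have := count_of_bounds dead (i : Int) r hrlen hb1 hb2
      unfold cnt
      omega
    have hprobe := mem_iff_probe dead (i : Int) hsort r hrlen hb1 hb2
    have hmemi : ((i : Int) ∈ dead) ↔ dead_channels.contains (i : Int) = true := by
      rw [hmem]
      simp [List.contains_eq_mem]
    have hcast : ((i : Int) + 1) = ((i + 1 : Nat) : Int) := by push_cast; ring
    by_cases hd : dead_channels.contains (i : Int) = true
    · -- dead channel: both sides skip; counter invariant preserved
      have hmemd : (i : Int) ∈ dead := hmemi.mpr hd
      have hcond : r < dead.length ∧ dead.getD r 0 = (i : Int) := hprobe.mp hmemd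
      simp only [if_pos hd, if_pos hcond]
      have hcnt1 : cnt dead ((i : Int) + 1) = cnt dead (i : Int) + 1 := by
        rw [cnt_step dead (i : Int) hnd]; simp [hmemd]
      have : (i : Int) - (cnt dead (i : Int) : Int)
           = ((i + 1 : Nat) : Int) - (cnt dead ((i + 1 : Nat) : Int) : Int) := by
        rw [← hcast, hcnt1]; push_cast; ring_nf
      rw [this, hcast]
      exact ih (i + 1) d
    · -- live channel: both sides insert spiketimes[i - cnt i]
      have hmemd : ¬ ((i : Int) ∈ dead) := fun h => hd (hmemi.mp h)
      have hcond : ¬ (r < dead.length ∧ dead.getD r 0 = (i : Int)) := fun h => hmemd (hprobe.mpr h)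
      simp only [if_neg hd, if_neg hcond]
      have hcnt1 : cnt dead ((i : Int) + 1) = cnt dead (i : Int) := by
        rw [cnt_step dead (i : Int) hnd]; simp [hmemd]
      have hnext : (i : Int) - (cnt dead (i : Int) : Int) + 1
           = ((i + 1 : Nat) : Int) - (cnt dead ((i + 1 : Nat) : Int) : Int) := by
        rw [← hcast, hcnt1]; ring
      rw [hrcnt] at *
      rw [hnext, hcast]
      exact ih (i + 1) _

-- ===== VERDICT (by name: the statement is the Claim_ definition above) =====
theorem make_label_spiketimes_map_spec : Claim_equal_make_label_spiketimes_map := by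
  intro ordered_labels spiketimes dead_channels _ _
  unfold Spec_make_label_spiketimes_map make_label_spiketimes_map make_label_spiketimes_map_alt
  set dead : List Int := PySem.List.sorted (PySem.Set.ofList (dead_channels.filter (fun d => 0 ≤ d))) (fun x => x) false with hdead
  have hsort : dead.Pairwise (· < ·) := by
    rw [hdead]; exact PySem.List.sorted_ofList_pairwise_lt _
  have hmem : ∀ x : Int, x ∈ dead ↔ (x ∈ dead_channels ∧ 0 ≤ x) := by
    intro x
    rw [hdead, PySem.List.mem_sorted, PySem.Set.mem_ofList, List.mem_filter]
    simp
  have hpos : ∀ x ∈ dead, 0 ≤ x := fun x hx => ((hmem x).mp hx).2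
  have h0 : (0 : Int) = (0 : Int) - (cnt dead ((0 : Nat) : Int) : Int) := by
    rw [show ((0 : Nat) : Int) = 0 by rfl, cnt_zero dead hpos]; ring
  have := loop_eq spiketimes dead_channels dead hmem hsort ordered_labels 0 PySem.Dict.empty
  rw [show ((0 : Nat) : Int) = 0 by rfl] at this
  rw [show (PySem.Dict.empty, (0 : Int)) = ((PySem.Dict.empty : PySem.Dict String Int), (0 : Int) - (cnt dead ((0 : Nat) : Int) : Int)) by rw [← h0]]
  rw [show ((0 : Nat) : Int) = 0 by rfl] at *
  rw [this]
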